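-- pv_equiv track=rewrite | github.com/nextsync/aodv-en | firmware/tools/draw_topology.py | select_snapshot_ts
-- ===== SOURCE A (Python) =====
-- from typing import Dict, List, Optional, Tuple
--
-- def select_snapshot_ts(routes: List[Dict], requested: Optional[int]) -> int:
--     if not routes:
--         return 0
--
--     snapshots = sorted({r["snapshot_ts"] for r in routes if r["snapshot_ts"] > 0})
--     if not snapshots:
--         return 0
--
--     if requested is None:
--         return snapshots[-1]
--
--     # Pick the closest snapshot <= requested, else the earliest.
--     prior = [ts for ts in snapshots if ts <= requested]
--     if prior:
--         return prior[-1]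
--     return snapshots[0]
-- ===== SOURCE B (Python) =====
-- from typing import Dict, List, Optional
--
-- def select_snapshot_ts(routes: List[Dict], requested: Optional[int]) -> int:
--     # One accumulating pass: track min, max and best <= requested over positive timestamps.
--     gmin = gmax = best = None
--     for r in routes:
--         ts = r["snapshot_ts"]
--         if ts > 0:
--             gmin = ts if gmin is None else min(gmin, ts)
--             gmax = ts if gmax is None else max(gmax, ts)
--             if requested is not None and ts <= requested:
--                 best = ts if best is None else max(best, ts)
--     if gmin is None:
--         return 0
--     if requested is None:
--         return gmax
--     return best if best is not None else gmin
-- ===== Notes on version B (the rewrite author's own statement) =====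
-- stated objective: faster
-- what changed: Replaces build-a-set, sort it and scan for the last element <= requested by a single pass over routes maintaining three running aggregates (min, max, best <= requested) over positive timestamps.
import Mathlib
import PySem

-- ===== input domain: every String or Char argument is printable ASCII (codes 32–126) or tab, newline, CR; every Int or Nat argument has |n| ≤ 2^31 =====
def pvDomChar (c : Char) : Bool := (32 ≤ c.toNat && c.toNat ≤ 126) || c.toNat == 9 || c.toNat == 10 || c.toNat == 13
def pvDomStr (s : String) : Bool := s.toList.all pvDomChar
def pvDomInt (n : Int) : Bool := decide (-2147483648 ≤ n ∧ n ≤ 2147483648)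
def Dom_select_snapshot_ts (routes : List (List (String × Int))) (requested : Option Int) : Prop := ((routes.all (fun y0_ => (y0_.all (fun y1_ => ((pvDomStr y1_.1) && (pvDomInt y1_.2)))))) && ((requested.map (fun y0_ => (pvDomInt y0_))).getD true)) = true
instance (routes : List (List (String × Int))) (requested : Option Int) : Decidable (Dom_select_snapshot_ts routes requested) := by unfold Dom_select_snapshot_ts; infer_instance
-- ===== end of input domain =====

-- B replaces A's build-a-set / sort / scan-for-last-≤-requested by a single accumulating pass
-- keeping three running aggregates (min, max, best ≤ requested) over the positive timestamps (objective: faster).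

-- ===== PORT A =====
-- r["snapshot_ts"] (first-match lookup; key present on every route inside Pre_)
def routeTs (r : List (String × Int)) : Int := ((PySem.Dict.mk r).get? "snapshot_ts").getD 0

def select_snapshot_ts (routes : List (List (String × Int))) (requested : Option Int) : Int :=
  if routes = [] then 0
  else
    let snapshots := PySem.List.sorted (PySem.Set.ofList (routes.filterMap (fun r =>
      if routeTs r > 0 then some (routeTs r) else none))) (fun x => x) false
    if snapshots = [] then 0
    else
      match requested with
      | none => (PySem.List.pyGet? snapshots (-1)).getD 0
      | some q =>
        let prior := snapshots.filter (fun ts => decide (ts ≤ q))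
        if prior ≠ [] then (PySem.List.pyGet? prior (-1)).getD 0
        else (PySem.List.pyGet? snapshots 0).getD 0

-- ===== PORT B =====
-- loop body of B: update (gmin, gmax, best) with one route
def bStep (requested : Option Int) (acc : Option Int × Option Int × Option Int)
    (r : List (String × Int)) : Option Int × Option Int × Option Int :=
  let ts := routeTs r
  if ts > 0 then
    ((some (acc.1.elim ts (fun m => min m ts))),
     (some (acc.2.1.elim ts (fun m => max m ts))),
     (match requested with
      | some q => if ts ≤ q then some (acc.2.2.elim ts (fun b => max b ts)) else acc.2.2
      | none => acc.2.2))
  else acc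

def select_snapshot_ts_alt (routes : List (List (String × Int))) (requested : Option Int) : Int :=
  match routes.foldl (bStep requested) (none, none, none) with
  | (none, _, _) => 0
  | (some gmin, gmax, best) =>
    match requested with
    | none => gmax.getD gmin
    | some _ => best.getD gmin

-- ===== PRECONDITION & SPEC =====
-- Pre_ excludes routes missing the "snapshot_ts" key, on which Python A raises KeyError.
def Pre_select_snapshot_ts (routes : List (List (String × Int))) (requested : Option Int) : Prop :=
  ∀ r ∈ routes, (((PySem.Dict.mk r).get? "snapshot_ts").isSome = true)
instance (routes : List (List (String × Int))) (requested : Option Int) : Decidable (Pre_select_snapshot_ts routes requested) := by unfold Pre_select_snapshot_ts; infer_instance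
def pvWitness_select_snapshot_ts : (List (List (String × Int))) × Option Int :=
  ([[("snapshot_ts", (5 : Int))], [("snapshot_ts", (3 : Int))]], some 4)

def Spec_select_snapshot_ts (routes : List (List (String × Int))) (requested : Option Int) (out : Int) : Prop := out = select_snapshot_ts_alt routes requested
instance (routes : List (List (String × Int))) (requested : Option Int) (out : Int) : Decidable (Spec_select_snapshot_ts routes requested out) := by unfold Spec_select_snapshot_ts; infer_instance

-- ===== CLAIM (what is proved, stated in full; the proofs are below) =====
def Claim_equal_select_snapshot_ts : Prop := ∀ (routes : List (List (String × Int))) (requested : Option Int), Dom_select_snapshot_ts routes requested → Pre_select_snapshot_ts routes requested → Spec_select_snapshot_ts routes requested (select_snapshot_ts routes requested)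

-- ===== LEMMAS AND PROOFS =====

-- the (multi)list of positive timestamps, in route order
def posTs (routes : List (List (String × Int))) : List Int :=
  routes.filterMap (fun r => if routeTs r > 0 then some (routeTs r) else none)

-- B's step as a function of the timestamp alone
def tStep (requested : Option Int) (acc : Option Int × Option Int × Option Int)
    (ts : Int) : Option Int × Option Int × Option Int :=
  ((some (acc.1.elim ts (fun m => min m ts))),
   (some (acc.2.1.elim ts (fun m => max m ts))),
   (match requested with
    | some q => if ts ≤ q then some (acc.2.2.elim ts (fun b => max b ts)) else acc.2.2
    | none => acc.2.2))

lemma foldl_bStep_eq (requested : Option Int) (routes : List (List (String × Int)))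
    (acc : Option Int × Option Int × Option Int) :
    routes.foldl (bStep requested) acc = (posTs routes).foldl (tStep requested) acc := by
  induction routes generalizing acc with
  | nil => rfl
  | cons r t ih =>
    by_cases h : routeTs r > 0 <;>
      simp [posTs, h, bStep, tStep, ih, List.foldl_cons]

def stState (requested : Option Int) (l : List Int) : Option Int × Option Int × Option Int :=
  l.foldl (tStep requested) (none, none, none)

lemma stState_append (requested : Option Int) (l : List Int) (ts : Int) :
    stState requested (l ++ [ts]) = tStep requested (stState requested l) ts := by
  simp [stState, List.foldl_append]

-- full invariant of the fold state
lemma stState_inv (requested : Option Int) (l : List Int) :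
    (((stState requested l).1 = none) ↔ l = [])
    ∧ (∀ m, (stState requested l).1 = some m → m ∈ l ∧ ∀ y ∈ l, m ≤ y)
    ∧ (((stState requested l).2.1 = none) ↔ l = [])
    ∧ (∀ m, (stState requested l).2.1 = some m → m ∈ l ∧ ∀ y ∈ l, y ≤ m)
    ∧ (∀ q, requested = some q →
        ((((stState requested l).2.2 = none) ↔ ∀ y ∈ l, ¬ y ≤ q)
        ∧ (∀ b, (stState requested l).2.2 = some b → b ∈ l ∧ b ≤ q ∧ ∀ y ∈ l, y ≤ q → y ≤ b))) := by
  induction l using List.reverseRecOn with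
  | nil => simp [stState, List.foldl_nil]
  | append_singleton l ts ih =>
    obtain ⟨h1, h2, h3, h4, h5⟩ := ih
    rw [stState_append]
    set st := stState requested l with hst
    refine ⟨?_, ?_, ?_, ?_, ?_⟩
    · simp [tStep]
    · intro m hm
      simp only [tStep] at hm
      cases hA : st.1 with
      | none =>
        have hl : l = [] := h1.mp hA
        subst hl
        simp [hA] at hm
        simp [hm]
      | some a =>
        have ⟨ha1, ha2⟩ := h2 a hA
        simp [hA] at hm
        subst hm
        constructor
        · rcases min_choice a ts with h | h <;> simp [h, ha1]
        · intro y hy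
          rcases List.mem_append.mp hy with hy | hy
          · exact le_trans (min_le_left a ts) (ha2 y hy)
          · simp at hy; simpa [hy] using min_le_right a ts
    · simp [tStep]
    · intro m hm
      simp only [tStep] at hm
      cases hA : st.2.1 with
      | none =>
        have hl : l = [] := h3.mp hA
        subst hl
        simp [hA] at hm
        simp [hm]
      | some a =>
        have ⟨ha1, ha2⟩ := h4 a hA
        simp [hA] at hm
        subst hm
        constructor
        · rcases max_choice a ts with h | h <;> simp [h, ha1]
        · intro y hy
          rcases List.mem_append.mp hy with hy | hy
          · exact le_trans (ha2 y hy) (le_max_left a ts)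
          · simp at hy; simpa [hy] using le_max_right a ts
    · intro q hq
      subst hq
      obtain ⟨h5a, h5b⟩ := h5 q rfl
      simp only [tStep]
      by_cases hle : ts ≤ q
      · simp only [hle, if_pos]
        constructor
        · constructor
          · intro h; cases hB : st.2.2 <;> simp [hB] at h
          · intro h; exact absurd hle (h ts (by simp))
        · intro b hb
          cases hB : st.2.2 with
          | none =>
            simp [hB] at hb
            subst hb
            refine ⟨by simp, hle, ?_⟩
            intro y hy hyq
            rcases List.mem_append.mp hy with hy | hy
            · exact absurd hyq (h5a.mp hB y hy)
            · simp at hy; omega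
          | some c =>
            obtain ⟨hc1, hc2, hc3⟩ := h5b c hB
            simp [hB] at hb
            subst hb
            refine ⟨?_, by omega, ?_⟩
            · rcases max_choice c ts with h | h <;> simp [h, hc1]
            · intro y hy hyq
              rcases List.mem_append.mp hy with hy | hy
              · exact le_trans (hc3 y hy hyq) (le_max_left c ts)
              · simp at hy; simpa [hy] using le_max_right c ts
      · simp only [hle, if_false]
        constructor
        · constructor
          · intro h y hy
            rcases List.mem_append.mp hy with hy | hy
            · exact h5a.mp h y hy
            · simp at hy; subst hy; exact hle
          · intro h
            exact h5a.mpr (fun y hy => h y (List.mem_append.mpr (Or.inl hy)))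
        · intro b hb
          obtain ⟨hb1, hb2, hb3⟩ := h5b b hb
          refine ⟨List.mem_append.mpr (Or.inl hb1), hb2, ?_⟩
          intro y hy hyq
          rcases List.mem_append.mp hy with hy | hy
          · exact hb3 y hy hyq
          · simp at hy; subst hy; exact absurd hyq hle
-- last element of a ≤-sorted list is a maximum
lemma getLast_isMax (l : List Int) (hp : l.Pairwise (· ≤ ·)) (hne : l ≠ []) :
    ∀ y ∈ l, y ≤ l.getLast hne := by
  induction l with
  | nil => simp at hne
  | cons x t ih =>
    intro y hy
    cases t with
    | nil => simp at hy; simp [hy]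
    | cons z t' =>
      rw [List.getLast_cons (by simp)]
      rw [List.mem_cons] at hy
      rcases hy with rfl | hy
      · have hx : y ≤ z := (List.pairwise_cons.mp hp).1 z (by simp)
        have := ih (List.pairwise_cons.mp hp).2 (by simp) z (by simp)
        omega
      · exact ih (List.pairwise_cons.mp hp).2 (by simp) y hy

lemma head_isMin (l : List Int) (hp : l.Pairwise (· ≤ ·)) (x : Int) (t : List Int)
    (h : l = x :: t) : ∀ y ∈ l, x ≤ y := by
  subst h
  intro y hy
  rw [List.mem_cons] at hy
  rcases hy with rfl | hy
  · exact le_refl _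
  · exact (List.pairwise_cons.mp hp).1 y hy

-- ===== VERDICT (by name: the statement is the Claim_ definition above) =====
-- A's body after the empty-routes check equals B's post-loop selection, for any timestamp list L
lemma bridge (L : List Int) (requested : Option Int) :
    (let snapshots := PySem.List.sorted (PySem.Set.ofList L) (fun x => x) false
     if snapshots = [] then (0 : Int)
     else
       match requested with
       | none => (PySem.List.pyGet? snapshots (-1)).getD 0
       | some q =>
         let prior := snapshots.filter (fun ts => decide (ts ≤ q))
         if prior ≠ [] then (PySem.List.pyGet? prior (-1)).getD 0
         else (PySem.List.pyGet? snapshots 0).getD 0)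
    = (match stState requested L with
       | (none, _, _) => (0 : Int)
       | (some gmin, gmax, best) =>
         match requested with
         | none => gmax.getD gmin
         | some _ => best.getD gmin) := by
  obtain ⟨i1, i2, i3, i4, i5⟩ := stState_inv requested L
  rcases hstE : stState requested L with ⟨o1, o2, o3⟩
  rw [hstE] at i1 i2 i3 i4 i5
  simp only at i1 i2 i3 i4 i5
  set s := PySem.List.sorted (PySem.Set.ofList L) (fun x => x) false with hs
  have hmem : ∀ x, x ∈ s ↔ x ∈ L := by
    intro x
    rw [hs, PySem.List.mem_sorted, PySem.Set.mem_ofList]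
  have hpair : s.Pairwise (· ≤ ·) := by
    have := PySem.List.sorted_pairwise (xs := PySem.Set.ofList L) (key := fun x => x)
    simpa using this
  have hsnil : s = [] ↔ L = [] := by
    constructor
    · intro h
      cases hLc : L with
      | nil => rfl
      | cons a t =>
        exfalso
        have : a ∈ s := (hmem a).mpr (by rw [hLc]; simp)
        rw [h] at this; simp at this
    · intro h
      rw [hs, h]
      rfl
  show (if s = [] then (0 : Int) else _) = _
  by_cases hse : s = []
  · rw [if_pos hse]
    have hL0 : L = [] := hsnil.mp hse
    have : o1 = none := by
      have := i1.mpr hL0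
      exact this
    rw [this]
  · rw [if_neg hse]
    have hLne : L ≠ [] := fun h => hse (hsnil.mpr h)
    cases o1 with
    | none => exact absurd (i1.mp rfl) hLne
    | some gmin =>
      obtain ⟨hg1, hg2⟩ := i2 gmin rfl
      cases requested with
      | none =>
        cases o2 with
        | none => exact absurd (i3.mp rfl) hLne
        | some gmax =>
          obtain ⟨hm1, hm2⟩ := i4 gmax rfl
          have h1 : s.getLast hse ≤ gmax := hm2 _ ((hmem _).mp (List.getLast_mem hse))
          have h2 : gmax ≤ s.getLast hse :=
            getLast_isMax s hpair hse gmax ((hmem gmax).mpr hm1)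
          simp only [PySem.List.pyGet?_neg_one, List.getLast?_eq_some_getLast hse,
            Option.getD_some]
          omega
      | some q =>
        obtain ⟨j1, j2⟩ := i5 q rfl
        set prior := s.filter (fun ts => decide (ts ≤ q)) with hprior
        show (if prior ≠ [] then _ else _) = _
        have hpmem : ∀ x, x ∈ prior ↔ x ∈ L ∧ x ≤ q := by
          intro x
          rw [hprior, List.mem_filter]
          simp [hmem]
        have hppair : prior.Pairwise (· ≤ ·) := List.Pairwise.filter _ hpair
        by_cases hpe : prior = []
        · rw [if_neg (by simp [hpe])]
          have hnone : o3 = none := by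
            apply j1.mpr
            intro y hy hle
            have : y ∈ prior := (hpmem y).mpr ⟨hy, hle⟩
            rw [hpe] at this; simp at this
          subst hnone
          cases hsc : s with
          | nil => exact absurd hsc hse
          | cons x t =>
            have hxmin : ∀ y ∈ s, x ≤ y := head_isMin s hpair x t hsc
            have h1 : x ≤ gmin := hxmin gmin ((hmem gmin).mpr hg1)
            have h2 : gmin ≤ x := hg2 x ((hmem x).mp (by rw [hsc]; simp))
            simp only [PySem.List.pyGet?_zero_cons, Option.getD_some, Option.getD_none]
            omega
        · rw [if_pos (by simp [hpe])]
          cases o3 with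
          | none =>
            exfalso
            have := j1.mp rfl
            cases hpc : prior with
            | nil => exact hpe hpc
            | cons x t =>
              have hx : x ∈ L ∧ x ≤ q := (hpmem x).mp (by rw [hpc]; simp)
              exact this x hx.1 hx.2
          | some best =>
            obtain ⟨hb1, hb2, hb3⟩ := j2 best rfl
            have hlmem := (hpmem _).mp (List.getLast_mem hpe)
            have h1 : prior.getLast hpe ≤ best := hb3 _ hlmem.1 hlmem.2
            have h2 : best ≤ prior.getLast hpe :=
              getLast_isMax prior hppair hpe best ((hpmem best).mpr ⟨hb1, hb2⟩)
            rw [← hprior]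
            simp only [PySem.List.pyGet?_neg_one, List.getLast?_eq_some_getLast hpe,
              Option.getD_some]
            omega

-- ===== VERDICT (by name: the statement is the Claim_ definition above) =====
theorem select_snapshot_ts_spec : Claim_equal_select_snapshot_ts := by
  intro routes requested _ _
  unfold Spec_select_snapshot_ts select_snapshot_ts select_snapshot_ts_alt
  rw [foldl_bStep_eq]
  by_cases hr : routes = []
  · subst hr
    rfl
  · rw [if_neg hr]
    exact bridge (posTs routes) requested
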